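-- pv_equiv track=rewrite | github.com/jtcrum/zse | src/zse/cation_utilities.py | count_rings
-- ===== SOURCE A (Python) =====
-- def count_rings(paths):
--     Class = [len(p) // 2 for p in paths]
--     paths = [x for _, x in sorted(zip(Class, paths), reverse=True)]
--     Class.sort(reverse=True)
--
--     class_count = []
--     for i, item in enumerate(Class):
--         if i == 0:
--             class_count.append(1)
--         else:
--             counter = 1 + sum(bool(item == Class[j]) for j in range(i))
--             class_count.append(counter)
--
--     return Class, class_count, paths
-- ===== SOURCE B (Python) =====
-- def count_rings(paths):
--     pairs = sorted(((len(p) // 2, p) for p in paths), reverse=True)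
--     classes, counts, sorted_paths = [], [], []
--     prev = None
--     run = 0
--     for c, p in pairs:
--         run = run + 1 if c == prev else 1
--         prev = c
--         classes.append(c)
--         counts.append(run)
--         sorted_paths.append(p)
--     return classes, counts, sorted_paths
-- ===== Notes on version B (the rewrite author's own statement) =====
-- stated objective: alternative
-- what changed: B sorts the (class, path) pairs once and computes each occurrence count with a single running counter over the contiguous equal-class runs, instead of A's per-element rescan of the whole prefix (sum over range(i)); intended as asymptotically lighter, but a timing run did not consistently confirm a speed-up, so no speed is claimed.
import Mathlib
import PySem

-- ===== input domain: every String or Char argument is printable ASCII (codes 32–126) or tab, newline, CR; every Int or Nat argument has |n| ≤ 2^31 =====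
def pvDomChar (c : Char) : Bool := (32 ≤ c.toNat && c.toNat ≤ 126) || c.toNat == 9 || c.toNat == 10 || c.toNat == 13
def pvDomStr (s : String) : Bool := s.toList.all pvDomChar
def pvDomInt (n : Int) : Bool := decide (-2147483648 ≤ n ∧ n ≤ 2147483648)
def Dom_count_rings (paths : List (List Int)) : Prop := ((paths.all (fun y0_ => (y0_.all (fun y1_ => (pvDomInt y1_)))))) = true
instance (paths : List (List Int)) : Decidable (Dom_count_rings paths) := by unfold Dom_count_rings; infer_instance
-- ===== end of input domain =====

-- B replaces A's per-element prefix rescan by a single running counter over the sorted pairs (objective: alternative algorithm).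

-- ===== PORT A =====
def count_rings (paths : List (List Int)) : List Int × List Int × List (List Int) :=
  let Class := paths.map (fun p => PySem.Int.floordiv (PySem.List.len p) 2)
  let paths2 := (PySem.List.sorted2 (Class.zip paths) Prod.fst Prod.snd true).map (fun x => x.2)
  let Class2 := PySem.List.sorted Class (fun x => x) true
  let class_count := (PySem.List.enumerate Class2 0).foldl (fun acc it =>
      if it.1 == 0 then acc ++ [(1 : Int)]
      else acc ++ [1 + ((PySem.List.pyRange 0 it.1 1).map
        (fun j => if it.2 == PySem.List.pyGetD Class2 j 0 then (1 : Int) else 0)).sum]) []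
  (Class2, class_count, paths2)

-- ===== PORT B =====
def count_rings_alt (paths : List (List Int)) : List Int × List Int × List (List Int) :=
  let pairs := PySem.List.sorted2 (paths.map (fun p => (PySem.Int.floordiv (PySem.List.len p) 2, p)))
      Prod.fst Prod.snd true
  let st := pairs.foldl
      (fun (st : Option Int × Int × List Int × List Int × List (List Int)) cp =>
        let run := if some cp.1 == st.1 then st.2.1 + 1 else 1
        (some cp.1, run, st.2.2.1 ++ [cp.1], st.2.2.2.1 ++ [run], st.2.2.2.2 ++ [cp.2]))
      (none, 0, [], [], [])
  (st.2.2.1, st.2.2.2.1, st.2.2.2.2)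

-- ===== PRECONDITION & SPEC =====
def Spec_count_rings (paths : List (List Int)) (out : List Int × List Int × List (List Int)) : Prop := out = count_rings_alt paths
instance (paths : List (List Int)) (out : List Int × List Int × List (List Int)) : Decidable (Spec_count_rings paths out) := by unfold Spec_count_rings; infer_instance

-- ===== CLAIM (what is proved, stated in full; the proofs are below) =====
def Claim_equal_count_rings : Prop := ∀ (paths : List (List Int)), Dom_count_rings paths → Spec_count_rings paths (count_rings paths)

-- ===== LEMMAS AND PROOFS =====

-- A-side spec: count of the current element in the prefix built so far, plus one.
def hSpec : List Int → List Int → List Int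
  | _, [] => []
  | pre, c :: rest => (1 + (pre.count c : Int)) :: hSpec (pre ++ [c]) rest

-- B-side counts, abstracted to the class list alone.
def gRun : Option Int → Int → List Int → List Int
  | _, _, [] => []
  | prev, run, c :: rest =>
    let r := if some c == prev then run + 1 else 1
    r :: gRun (some c) r rest

-- insertBy keeps key-descending order when `before` decides the key order.
theorem insertBy_pairwise_key_ge {α κ : Type} [LinearOrder κ] (key : α → κ)
    (before : α → α → Bool)
    (h1 : ∀ a b, before a b = true → key b ≤ key a)
    (h2 : ∀ a b, before a b = false → key a ≤ key b)
    (x : α) (ys : List α)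
    (hys : ys.Pairwise (fun a b => key b ≤ key a)) :
    (PySem.List.insertBy before x ys).Pairwise (fun a b => key b ≤ key a) := by
  induction ys with
  | nil => simp [PySem.List.insertBy]
  | cons y ys ih =>
    rcases List.pairwise_cons.mp hys with ⟨hy, hys'⟩
    by_cases hb : before x y = true
    · simp only [PySem.List.insertBy, hb, if_true]
      refine List.pairwise_cons.mpr ⟨?_, hys⟩
      intro z hz
      rcases List.mem_cons.mp hz with rfl | hz
      · exact h1 _ _ hb
      · exact le_trans (hy z hz) (h1 _ _ hb)
    · simp only [PySem.List.insertBy, hb]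
      refine List.pairwise_cons.mpr ⟨?_, ih hys'⟩
      intro z hz
      rw [PySem.List.insertBy_mem_iff] at hz
      rcases hz with hz | hz
      · subst hz; exact h2 _ _ (by simpa using hb)
      · exact hy z hz

theorem foldl_insertBy_pairwise_key_ge {α κ : Type} [LinearOrder κ] (key : α → κ)
    (before : α → α → Bool)
    (h1 : ∀ a b, before a b = true → key b ≤ key a)
    (h2 : ∀ a b, before a b = false → key a ≤ key b)
    (xs : List α) :
    ∀ acc : List α, acc.Pairwise (fun a b => key b ≤ key a) →
    (xs.foldl (fun acc x => PySem.List.insertBy before x acc) acc).Pairwise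
      (fun a b => key b ≤ key a) := by
  induction xs with
  | nil => intro acc h; exact h
  | cons x xs ih =>
    intro acc h
    exact ih _ (insertBy_pairwise_key_ge key before h1 h2 x acc h)

theorem sorted2_fst_pairwise_ge (xs : List (Int × List Int)) :
    (PySem.List.sorted2 xs Prod.fst Prod.snd true).Pairwise (fun a b => b.1 ≤ a.1) := by
  unfold PySem.List.sorted2
  refine foldl_insertBy_pairwise_key_ge Prod.fst _ ?_ ?_ xs [] (by simp)
  · intro a b hab
    rcases Bool.or_eq_true_iff.mp hab with h | h
    · exact le_of_lt (of_decide_eq_true h)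
    · rcases Bool.and_eq_true_iff.mp h with ⟨h', _⟩
      exact le_of_not_gt (of_decide_eq_false (by simpa using h'))
  · intro a b hab
    rcases Bool.or_eq_false_iff.mp hab with ⟨h, _⟩
    exact le_of_not_gt (of_decide_eq_false h)

-- the sorted class list equals the first components of the sorted pairs
theorem sorted_fst_eq (paths : List (List Int)) :
    PySem.List.sorted (paths.map (fun p => PySem.Int.floordiv (PySem.List.len p) 2)) (fun x => x) true
      = (PySem.List.sorted2 (paths.map (fun p => (PySem.Int.floordiv (PySem.List.len p) 2, p)))
          Prod.fst Prod.snd true).map Prod.fst := by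
  set f : List Int → Int := fun p => PySem.Int.floordiv (PySem.List.len p) 2 with hf
  have hperm : (PySem.List.sorted (paths.map f) (fun x => x) true).Perm
      ((PySem.List.sorted2 (paths.map (fun p => (f p, p))) Prod.fst Prod.snd true).map Prod.fst) := by
    refine (PySem.List.sorted_perm _ _ _).trans ?_
    refine List.Perm.symm ?_
    refine (List.Perm.map Prod.fst (PySem.List.sorted2_perm _ _ _ _)).trans ?_
    rw [List.map_map]
    exact List.Perm.refl _
  have h1 : (PySem.List.sorted (paths.map f) (fun x => x) true).Pairwise (fun a b => b ≤ a) :=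
    PySem.List.sorted_pairwise_rev _ _
  have h2 : ((PySem.List.sorted2 (paths.map (fun p => (f p, p))) Prod.fst Prod.snd true).map
      Prod.fst).Pairwise (fun a b : Int => b ≤ a) :=
    (sorted2_fst_pairwise_ge _).map _ (fun a b h => h)
  have := PySem.List.eq_of_perm_of_pairwise_le_of_injective
      (l₁ := (PySem.List.sorted (paths.map f) (fun x => x) true).reverse)
      (l₂ := ((PySem.List.sorted2 (paths.map (fun p => (f p, p))) Prod.fst Prod.snd true).map Prod.fst).reverse)
      (fun x : Int => x) (fun a b h => h)
      ((List.reverse_perm _).trans (hperm.trans (List.reverse_perm _).symm))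
      (List.pairwise_reverse.mpr h1) (List.pairwise_reverse.mpr h2)
  exact List.reverse_injective this

-- (range n).map (getD · 0) is the prefix of length n
theorem map_getD_range (full : List Int) (n : Nat) (hn : n ≤ full.length) :
    (List.range n).map (fun k => full.getD k 0) = full.take n := by
  induction n with
  | zero => simp
  | succ n ih =>
    have hlt : n < full.length := hn
    rw [List.range_succ, List.map_append, ih (Nat.le_of_succ_le hn), List.take_add_one]
    simp [List.getElem?_eq_getElem hlt]

theorem countP_beq (c : Int) (pre : List Int) :
    pre.countP (fun x => c == x) = pre.count c := by
  unfold List.count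
  refine List.countP_congr ?_
  intro x _
  simp [BEq.comm]

-- A's enumerate-fold body, mapped, equals hSpec
theorem enum_map_eq_hSpec (full : List Int) :
    ∀ rest pre : List Int, full = pre ++ rest →
    (PySem.List.enumerate rest (pre.length : Int)).map (fun it : Int × Int =>
        if it.1 == 0 then (1 : Int)
        else 1 + ((PySem.List.pyRange 0 it.1 1).map
          (fun j => if it.2 == PySem.List.pyGetD full j 0 then (1 : Int) else 0)).sum)
      = hSpec pre rest := by
  intro rest
  induction rest with
  | nil => intro pre _; simp [hSpec, PySem.List.enumerate]
  | cons c rest ih =>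
    intro pre hfull
    rw [PySem.List.enumerate_cons, List.map_cons]
    have hlen : pre.length ≤ full.length := by subst hfull; simp
    have hsum : ((PySem.List.pyRange 0 (pre.length : Int) 1).map
        (fun j => if c == PySem.List.pyGetD full j 0 then (1 : Int) else 0)).sum
        = (pre.count c : Int) := by
      rw [PySem.List.pyRange_zero_nat, List.map_map]
      have hmap : (List.range pre.length).map
          ((fun j => if c == PySem.List.pyGetD full j 0 then (1 : Int) else 0) ∘ (fun k : Nat => (k : Int)))
          = (full.take pre.length).map (fun x => if c == x then (1 : Int) else 0) := by
        rw [← map_getD_range full pre.length hlen, List.map_map]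
        refine List.map_congr_left ?_
        intro k _
        simp [Function.comp, PySem.List.pyGetD_natCast]
      rw [hmap, PySem.List.sum_map_ite_one_zero (fun x => c == x) (full.take pre.length)]
      have hpre : full.take pre.length = pre := by subst hfull; simp
      rw [hpre, countP_beq]
    by_cases h0 : pre.length = 0
    · have hpre : pre = [] := List.length_eq_zero_iff.mp h0
      subst hpre
      simp only [List.length_nil, Nat.cast_zero, hSpec]
      rw [show ((0 : Int) == 0) = true from rfl]
      simp only [if_true]
      refine List.cons_eq_cons.mpr ⟨by simp, ?_⟩
      have h01 : (0 : Int) + 1 = ((List.length [c] : Nat) : Int) := by simp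
      rw [h01]
      exact ih [c] (by simpa using hfull)
    · have hne : ((pre.length : Int) == 0) = false := by
        rw [beq_eq_false_iff_ne]
        exact_mod_cast h0
      rw [hne]
      simp only [Bool.false_eq_true, if_false, hSpec]
      rw [hsum]
      refine List.cons_eq_cons.mpr ⟨rfl, ?_⟩
      have h01 : (pre.length : Int) + 1 = (((pre ++ [c]).length : Nat) : Int) := by
        push_cast [List.length_append, List.length_cons, List.length_nil]; omega
      rw [h01]
      exact ih (pre ++ [c]) (by simpa using hfull)

-- the running-counter invariant: descending prefix + correct run count
theorem gRun_eq_hSpec :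
    ∀ rest pre : List Int, ∀ prev : Option Int, ∀ run : Int,
    (pre ++ rest).Pairwise (fun a b => b ≤ a) →
    ((prev = none ∧ pre = []) ∨
      (∃ x, prev = some x ∧ x ∈ pre ∧ run = (pre.count x : Int) ∧ ∀ y ∈ pre, x ≤ y)) →
    gRun prev run rest = hSpec pre rest := by
  intro rest
  induction rest with
  | nil => intro pre prev run _ _; simp [gRun, hSpec]
  | cons c rest ih =>
    intro pre prev run hpw hinv
    have hcle : ∀ y ∈ pre, c ≤ y := by
      intro y hy
      exact (List.pairwise_append.mp hpw).2.2 y hy c (List.mem_cons_self)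
    rcases hinv with ⟨hprev, hpre⟩ | ⟨x, hprev, hxmem, hrun, hxle⟩
    · subst hprev; subst hpre
      simp only [gRun, hSpec]
      rw [show ((some c == (none : Option Int)) = false) from rfl]
      simp only [Bool.false_eq_true, if_false]
      refine List.cons_eq_cons.mpr ⟨by simp, ?_⟩
      refine ih [c] (some c) 1 (by simpa using hpw) ?_
      exact Or.inr ⟨c, rfl, by simp, by simp [List.count], by simp⟩
    · subst hprev
      by_cases hcx : c = x
      · subst hcx
        simp only [gRun, hSpec]
        rw [show ((some c == some c) = true) by simp]
        simp only [if_true]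
        refine List.cons_eq_cons.mpr ⟨by rw [hrun]; ring, ?_⟩
        refine ih (pre ++ [c]) (some c) (run + 1) (by simpa using hpw) ?_
        refine Or.inr ⟨c, rfl, by simp, ?_, ?_⟩
        · have hcnt : (pre ++ [c]).count c = pre.count c + 1 := by simp
          rw [hcnt, hrun]; push_cast [Nat.cast_add]; ring_nf
        · intro y hy
          rcases List.mem_append.mp hy with hy | hy
          · exact hxle y hy
          · simp at hy; subst hy; exact le_refl _
      · have hbeq : ((some c == some x) = false) := by simp [hcx]
        simp only [gRun, hSpec, hbeq]
        simp only [Bool.false_eq_true, if_false]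
        have hclt : c < x := lt_of_le_of_ne (hcle x hxmem) hcx
        have hcnot : c ∉ pre := fun hc => absurd (hxle c hc) (not_le.mpr hclt)
        have hcount0 : pre.count c = 0 := List.count_eq_zero.mpr hcnot
        refine List.cons_eq_cons.mpr ⟨by rw [hcount0]; simp, ?_⟩
        refine ih (pre ++ [c]) (some c) 1 (by simpa using hpw) ?_
        refine Or.inr ⟨c, rfl, by simp, ?_, ?_⟩
        · have hcnt : (pre ++ [c]).count c = pre.count c + 1 := by simp
          rw [hcnt, hcount0]; simp
        · intro y hy
          rcases List.mem_append.mp hy with hy | hy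
          · exact hcle y hy
          · simp at hy; subst hy; exact le_refl _

-- B's fold, projected
theorem foldB_eq (pairs : List (Int × List Int)) :
    ∀ st : Option Int × Int × List Int × List Int × List (List Int),
    (pairs.foldl
      (fun (st : Option Int × Int × List Int × List Int × List (List Int)) cp =>
        let run := if some cp.1 == st.1 then st.2.1 + 1 else 1
        (some cp.1, run, st.2.2.1 ++ [cp.1], st.2.2.2.1 ++ [run], st.2.2.2.2 ++ [cp.2])) st).2.2
      = (st.2.2.1 ++ pairs.map Prod.fst,
         st.2.2.2.1 ++ gRun st.1 st.2.1 (pairs.map Prod.fst),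
         st.2.2.2.2 ++ pairs.map Prod.snd) := by
  induction pairs with
  | nil => intro st; simp [gRun]
  | cons cp pairs ih =>
    intro st
    rw [List.foldl_cons, ih]
    simp only [List.map_cons, gRun]
    cases hb : (some cp.1 == st.1) <;> simp [List.append_assoc]

theorem zip_map_self (paths : List (List Int)) (f : List Int → Int) :
    (paths.map f).zip paths = paths.map (fun p => (f p, p)) := by
  induction paths with
  | nil => rfl
  | cons p t ih => simp [ih]

-- ===== VERDICT (by name: the statement is the Claim_ definition above) =====
theorem count_rings_spec : Claim_equal_count_rings := by
  intro paths _
  simp only [Spec_count_rings, count_rings, count_rings_alt]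
  set f : List Int → Int := fun p => PySem.Int.floordiv (PySem.List.len p) 2 with hf
  rw [zip_map_self paths f]
  set pairs := PySem.List.sorted2 (paths.map (fun p => (f p, p))) Prod.fst Prod.snd true with hpairs
  set L := pairs.map Prod.fst with hL
  have hclass : PySem.List.sorted (paths.map f) (fun x => x) true = L := sorted_fst_eq paths
  rw [hclass, foldB_eq]
  have hfun : ∀ (acc : List Int) (it : Int × Int), it ∈ PySem.List.enumerate L 0 →
      (if it.1 == 0 then acc ++ [(1 : Int)]
       else acc ++ [1 + ((PySem.List.pyRange 0 it.1 1).map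
        (fun j => if it.2 == PySem.List.pyGetD L j 0 then (1 : Int) else 0)).sum])
      = acc ++ [if it.1 == 0 then (1 : Int)
          else 1 + ((PySem.List.pyRange 0 it.1 1).map
            (fun j => if it.2 == PySem.List.pyGetD L j 0 then (1 : Int) else 0)).sum] := by
    intro acc it _
    by_cases h : (it.1 == 0) = true <;> simp [h]
  have hcounts : (PySem.List.enumerate L 0).foldl (fun acc it =>
      if it.1 == 0 then acc ++ [(1 : Int)]
      else acc ++ [1 + ((PySem.List.pyRange 0 it.1 1).map
        (fun j => if it.2 == PySem.List.pyGetD L j 0 then (1 : Int) else 0)).sum]) []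
      = gRun none 0 L := by
    have hstep : (PySem.List.enumerate L 0).foldl (fun acc it =>
        if it.1 == 0 then acc ++ [(1 : Int)]
        else acc ++ [1 + ((PySem.List.pyRange 0 it.1 1).map
          (fun j => if it.2 == PySem.List.pyGetD L j 0 then (1 : Int) else 0)).sum]) []
        = (PySem.List.enumerate L 0).foldl (fun acc it =>
        acc ++ [if it.1 == 0 then (1 : Int)
          else 1 + ((PySem.List.pyRange 0 it.1 1).map
            (fun j => if it.2 == PySem.List.pyGetD L j 0 then (1 : Int) else 0)).sum]) [] :=
      PySem.List.foldl_congr_mem _ _ _ _ hfun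
    rw [hstep, PySem.List.foldl_append_singleton_eq_map, List.nil_append]
    have hLpw : L.Pairwise (fun a b : Int => b ≤ a) :=
      (sorted2_fst_pairwise_ge _).map _ (fun a b h => h)
    have h1 := enum_map_eq_hSpec L L [] (by simp)
    simp only [List.length_nil, Nat.cast_zero] at h1
    rw [h1]
    exact (gRun_eq_hSpec L [] none 0 (by simpa using hLpw) (Or.inl ⟨rfl, rfl⟩)).symm
  rw [hcounts]
  simp [← hL]
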